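-- pv_equiv track=rewrite | github.com/lyingwallnut/COSMOS-BDD-solver | reorder_aag_rcm.py | find_input_sources
-- ===== SOURCE A (Python) =====
-- def find_input_sources(lit, lit_to_idx, and_dict, cache):
--     if lit % 2 != 0:
--         lit -= 1
--     if lit in cache:
--         return cache[lit]
--     if lit in lit_to_idx:
--         idx = lit_to_idx[lit]
--         cache[lit] = {idx}
--         return cache[lit]
--     if lit in and_dict:
--         in1, in2 = and_dict[lit]
--         sources1 = find_input_sources(in1, lit_to_idx, and_dict, cache)
--         sources2 = find_input_sources(in2, lit_to_idx, and_dict, cache)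
--         combined = sources1.union(sources2)
--         cache[lit] = combined
--         return combined
--     cache[lit] = set()
--     return cache[lit]
-- ===== SOURCE B (Python) =====
-- def find_input_sources(lit, lit_to_idx, and_dict, cache):
--     # Bottom-up worklist fixpoint instead of A's top-down memoized recursion.
--     # Note: A mutates `cache` in place; B does not — equivalence is about the return value only.
--     lit -= lit % 2
--
--     def known(l):
--         # the sources of an even literal, if already determined (None = not yet)
--         if l in cache:
--             return cache[l]
--         if l in lit_to_idx:
--             return {lit_to_idx[l]}
--         if l in and_dict:
--             return val.get(l)
--         return set()
--
--     val = {}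
--     progress = True
--     while progress:
--         progress = False
--         for k in and_dict:
--             if k % 2 != 0 or k in val or k in cache or k in lit_to_idx:
--                 continue
--             a, b = and_dict[k]
--             sa = known(a - a % 2)
--             sb = known(b - b % 2)
--             if sa is not None and sb is not None:
--                 val[k] = sa.union(sb)
--                 progress = True
--     r = known(lit)
--     return r if r is not None else set()
-- ===== Notes on version B (the rewrite author's own statement) =====
-- stated objective: alternative
-- what changed: Replaces A's top-down memoized recursion (which mutates the shared cache dict) by a non-recursive bottom-up worklist fixpoint: repeated passes over and_dict fill a fresh table with the sources of each resolvable AND gate until no pass makes progress, and the answer is read off the table; B does not mutate `cache` (return value is identical).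
import Mathlib
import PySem

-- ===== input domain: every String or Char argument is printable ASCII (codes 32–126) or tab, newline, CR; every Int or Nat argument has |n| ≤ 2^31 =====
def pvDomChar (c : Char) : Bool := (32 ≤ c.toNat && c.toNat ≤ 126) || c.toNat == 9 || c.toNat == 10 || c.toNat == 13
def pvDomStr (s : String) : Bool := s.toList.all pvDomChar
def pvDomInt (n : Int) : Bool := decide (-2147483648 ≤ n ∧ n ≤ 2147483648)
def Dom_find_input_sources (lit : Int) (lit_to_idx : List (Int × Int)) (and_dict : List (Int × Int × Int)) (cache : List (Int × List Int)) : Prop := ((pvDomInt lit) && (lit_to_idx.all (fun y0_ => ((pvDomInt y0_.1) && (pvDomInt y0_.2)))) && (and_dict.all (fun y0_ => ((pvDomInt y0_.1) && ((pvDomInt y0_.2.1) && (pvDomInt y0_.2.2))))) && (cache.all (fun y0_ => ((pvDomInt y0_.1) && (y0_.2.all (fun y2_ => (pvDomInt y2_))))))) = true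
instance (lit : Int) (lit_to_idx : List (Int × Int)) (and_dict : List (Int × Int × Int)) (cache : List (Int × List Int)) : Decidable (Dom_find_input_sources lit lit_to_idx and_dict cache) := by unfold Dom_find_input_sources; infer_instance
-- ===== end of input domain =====

-- B replaces A's top-down memoized recursion (which mutates `cache` in place) by a bottom-up
-- worklist fixpoint over the AND gates; equivalence is about the RETURN value only (B does not
-- mutate `cache`).

-- ===== PORT A =====
-- A is general recursion (its recursion does not return when the DFS from lit hits a live cycle;
-- exactly those inputs are outside Pre_ below), so the port carries a fuel argument; fuel
-- 2*|and_dict|+2 exceeds the recursion depth on every input satisfying Pre_.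
def fisCore (ltx : PySem.Dict Int Int) (ad : PySem.Dict Int (Int × Int)) :
    Nat → Int → PySem.Dict Int (List Int) → List Int × PySem.Dict Int (List Int)
  | 0, _, cache => ([], cache)  -- fuel exhausted: unreachable under Pre_
  | fuel+1, lit0, cache =>
    -- if lit % 2 != 0: lit -= 1
    let lit : Int := if PySem.Int.mod lit0 2 ≠ 0 then lit0 - 1 else lit0
    match cache.get? lit with
    | some v => (v, cache)                                      -- return cache[lit]
    | none =>
      match ltx.get? lit with
      | some idx =>                                             -- cache[lit] = {idx}; return cache[lit]
        ([idx], cache.insert lit [idx])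
      | none =>
        match ad.get? lit with
        | some p =>                                             -- in1, in2 = and_dict[lit]
          let r1 := fisCore ltx ad fuel p.1 cache
          let r2 := fisCore ltx ad fuel p.2 r1.2
          let combined := PySem.Set.union r1.1 r2.1             -- sources1.union(sources2)
          (combined, r2.2.insert lit combined)                  -- cache[lit] = combined
        | none => ([], cache.insert lit [])                     -- cache[lit] = set()

def find_input_sources (lit : Int) (lit_to_idx : List (Int × Int)) (and_dict : List (Int × Int × Int)) (cache : List (Int × List Int)) : List Int :=
  (fisCore (PySem.Dict.mk lit_to_idx) (PySem.Dict.mk and_dict)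
    (2 * and_dict.length + 2) lit (PySem.Dict.mk cache)).1

-- ===== PORT B =====
-- def known(l): the sources of an even literal, if already determined (none = not yet)
def fisKnown (ltx : PySem.Dict Int Int) (ad : PySem.Dict Int (Int × Int))
    (cache val : PySem.Dict Int (List Int)) (l : Int) : Option (List Int) :=
  match cache.get? l with
  | some s => some s
  | none =>
    match ltx.get? l with
    | some i => some [i]
    | none => if ad.contains l then val.get? l else some []

-- one entry of the `for k in and_dict` loop; acc = (val, progress)
def fisStep (ltx : PySem.Dict Int Int) (ad : PySem.Dict Int (Int × Int))
    (cache : PySem.Dict Int (List Int))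
    (acc : PySem.Dict Int (List Int) × Bool) (e : Int × Int × Int) :
    PySem.Dict Int (List Int) × Bool :=
  let k := e.1
  if PySem.Int.mod k 2 ≠ 0 ∨ acc.1.contains k ∨ cache.contains k ∨ ltx.contains k then acc
  else
    match ad.get? k with
    | some p =>
      match fisKnown ltx ad cache acc.1 (p.1 - PySem.Int.mod p.1 2),
            fisKnown ltx ad cache acc.1 (p.2 - PySem.Int.mod p.2 2) with
      | some sa, some sb => (acc.1.insert k (PySem.Set.union sa sb), true)
      | _, _ => acc
    | none => acc

-- while progress: one round = one pass over and_dict; |and_dict|+1 rounds always reach the fixpoint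
def fisRounds (ltx : PySem.Dict Int Int) (ad : PySem.Dict Int (Int × Int))
    (cache : PySem.Dict Int (List Int)) (adL : List (Int × Int × Int)) :
    Nat → PySem.Dict Int (List Int) → PySem.Dict Int (List Int)
  | 0, val => val
  | n+1, val =>
    let r := adL.foldl (fisStep ltx ad cache) (val, false)
    if r.2 then fisRounds ltx ad cache adL n r.1 else val

def find_input_sources_alt (lit : Int) (lit_to_idx : List (Int × Int)) (and_dict : List (Int × Int × Int)) (cache : List (Int × List Int)) : List Int :=
  let litN := lit - PySem.Int.mod lit 2
  let val := fisRounds (PySem.Dict.mk lit_to_idx) (PySem.Dict.mk and_dict) (PySem.Dict.mk cache)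
    and_dict (and_dict.length + 1) PySem.Dict.empty
  match fisKnown (PySem.Dict.mk lit_to_idx) (PySem.Dict.mk and_dict) (PySem.Dict.mk cache) val litN with
  | some r => r
  | none => []

-- ===== PRECONDITION & SPEC =====
-- the normalized (even) form of a literal
def fisPn (l : Int) : Int := l - PySem.Int.mod l 2

-- a literal is "settled" if A resolves it without recursing: initial cache hit, input literal,
-- or not an AND gate
def fisBase (ltx : List (Int × Int)) (cache : List (Int × List Int))
    (ad : List (Int × Int × Int)) (k : Int) : Bool :=
  (PySem.Dict.mk cache).contains k || (PySem.Dict.mk ltx).contains k || !(PySem.Dict.mk ad).contains k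

-- fisGN n k: the DFS rooted at (even) literal k bottoms out within depth n — settled literals at
-- depth 0, an AND gate when both its normalized children bottom out one level lower.  It checks
-- only the SHAPE of the inputs (a well-foundedness/reachability condition on the AND graph); it
-- computes no output.
def fisGN (ltx : List (Int × Int)) (ad : List (Int × Int × Int)) (cache : List (Int × List Int)) :
    Nat → Int → Bool
  | 0, k => fisBase ltx cache ad k
  | n+1, k => fisBase ltx cache ad k ||
      (match (PySem.Dict.mk ad).get? k with
       | some p => fisGN ltx ad cache n (fisPn p.1) && fisGN ltx ad cache n (fisPn p.2)
       | none => true)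

-- Pre_ excludes exactly the inputs on which A's unbounded recursion never returns (Python raises
-- RecursionError): those where the DFS from lit reaches a cycle of AND gates not cut by the
-- initial cache or lit_to_idx.  On every input where A returns a value, Pre_ holds (depth
-- |and_dict|+1 saturates the well-foundedness check), so nothing A returns on is excluded.
def Pre_find_input_sources (lit : Int) (lit_to_idx : List (Int × Int)) (and_dict : List (Int × Int × Int)) (cache : List (Int × List Int)) : Prop :=
  fisGN lit_to_idx and_dict cache (and_dict.length + 1) (fisPn lit) = true
instance (lit : Int) (lit_to_idx : List (Int × Int)) (and_dict : List (Int × Int × Int)) (cache : List (Int × List Int)) : Decidable (Pre_find_input_sources lit lit_to_idx and_dict cache) := by unfold Pre_find_input_sources; infer_instance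

def pvWitness_find_input_sources : Int × (List (Int × Int)) × (List (Int × Int × Int)) × (List (Int × List Int)) :=
  (6, [(2, 0), (4, 1)], [(6, 2, 4)], [])

def Spec_find_input_sources (lit : Int) (lit_to_idx : List (Int × Int)) (and_dict : List (Int × Int × Int)) (cache : List (Int × List Int)) (out : List Int) : Prop := out = find_input_sources_alt lit lit_to_idx and_dict cache
instance (lit : Int) (lit_to_idx : List (Int × Int)) (and_dict : List (Int × Int × Int)) (cache : List (Int × List Int)) (out : List Int) : Decidable (Spec_find_input_sources lit lit_to_idx and_dict cache out) := by unfold Spec_find_input_sources; infer_instance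

-- ===== CLAIM (what is proved, stated in full; the proofs are below) =====
def Claim_equal_find_input_sources : Prop := ∀ (lit : Int) (lit_to_idx : List (Int × Int)) (and_dict : List (Int × Int × Int)) (cache : List (Int × List Int)), Dom_find_input_sources lit lit_to_idx and_dict cache → Pre_find_input_sources lit lit_to_idx and_dict cache → Spec_find_input_sources lit lit_to_idx and_dict cache (find_input_sources lit lit_to_idx and_dict cache)

-- ===== LEMMAS AND PROOFS =====
theorem fis_mod2 (l : Int) : PySem.Int.mod l 2 = l % 2 :=
  PySem.Int.mod_eq_emod_of_pos (by norm_num)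

theorem fisPn_even (l : Int) : PySem.Int.mod (fisPn l) 2 = 0 := by
  simp only [fisPn, fis_mod2]; omega

theorem fisPn_of_even (l : Int) (h : PySem.Int.mod l 2 = 0) : fisPn l = l := by
  simp only [fisPn, fis_mod2] at *; omega

theorem fisPn_idem (l : Int) : fisPn (fisPn l) = fisPn l :=
  fisPn_of_even _ (fisPn_even l)

theorem fisNormA (l : Int) : (if PySem.Int.mod l 2 ≠ 0 then l - 1 else l) = fisPn l := by
  simp only [fisPn, fis_mod2]
  split_ifs with h <;> omega

-- ===== groundedness (fisGN) machinery =====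
theorem fisBase_gn (ltx : List (Int × Int)) (ad : List (Int × Int × Int))
    (cache : List (Int × List Int)) {k : Int} (h : fisBase ltx cache ad k = true) :
    ∀ n, fisGN ltx ad cache n k = true := by
  intro n
  cases n with
  | zero => exact h
  | succ n => simp [fisGN, h]

theorem fisBase_false (ltx : List (Int × Int)) (ad : List (Int × Int × Int))
    (cache : List (Int × List Int)) {k : Int} {p : Int × Int}
    (hc : (PySem.Dict.mk cache).get? k = none) (hx : (PySem.Dict.mk ltx).get? k = none)
    (ha : (PySem.Dict.mk ad).get? k = some p) : fisBase ltx cache ad k = false := by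
  simp [fisBase, PySem.Dict.contains_eq_isSome_get?, hc, hx, ha]

theorem fisGN_zero_absurd (ltx : List (Int × Int)) (ad : List (Int × Int × Int))
    (cache : List (Int × List Int)) {k : Int} {p : Int × Int}
    (hc : (PySem.Dict.mk cache).get? k = none) (hx : (PySem.Dict.mk ltx).get? k = none)
    (ha : (PySem.Dict.mk ad).get? k = some p) (h : fisGN ltx ad cache 0 k = true) : False := by
  have := fisBase_false ltx ad cache hc hx ha
  simp only [fisGN] at h
  rw [this] at h; cases h

theorem fisGN_children (ltx : List (Int × Int)) (ad : List (Int × Int × Int))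
    (cache : List (Int × List Int)) {k : Int} {p : Int × Int} {n : Nat}
    (hc : (PySem.Dict.mk cache).get? k = none) (hx : (PySem.Dict.mk ltx).get? k = none)
    (ha : (PySem.Dict.mk ad).get? k = some p) (h : fisGN ltx ad cache (n+1) k = true) :
    fisGN ltx ad cache n (fisPn p.1) = true ∧ fisGN ltx ad cache n (fisPn p.2) = true := by
  have hb := fisBase_false ltx ad cache hc hx ha
  simp only [fisGN, hb, Bool.false_or, ha, Bool.and_eq_true] at h
  exact h

theorem fisGN_mono (ltx : List (Int × Int)) (ad : List (Int × Int × Int))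
    (cache : List (Int × List Int)) :
    ∀ n k, fisGN ltx ad cache n k = true → fisGN ltx ad cache (n+1) k = true := by
  intro n
  induction n with
  | zero =>
    intro k h
    exact fisBase_gn ltx ad cache h 1
  | succ n ih =>
    intro k h
    by_cases hb : fisBase ltx cache ad k = true
    · exact fisBase_gn ltx ad cache hb _
    · have hb' : fisBase ltx cache ad k = false := by
        cases hbb : fisBase ltx cache ad k
        · rfl
        · exact absurd hbb hb
      simp only [fisGN, hb', Bool.false_or] at h ⊢
      cases ha : (PySem.Dict.mk ad).get? k with
      | none => rfl
      | some p =>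
        rw [ha] at h
        simp only [Bool.and_eq_true] at h ⊢
        exact ⟨ih _ h.1, ih _ h.2⟩

theorem fisGN_mono_le (ltx : List (Int × Int)) (ad : List (Int × Int × Int))
    (cache : List (Int × List Int)) {n m : Nat} (h : n ≤ m) {k : Int}
    (hg : fisGN ltx ad cache n k = true) : fisGN ltx ad cache m k = true := by
  induction m with
  | zero => have : n = 0 := by omega
            subst this; exact hg
  | succ m ih =>
    rcases Nat.lt_or_ge n (m+1) with hlt | hge
    · exact fisGN_mono ltx ad cache m k (ih (by omega))
    · have : n = m+1 := by omega
      subst this; exact hg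

theorem fisGN_step_subset (ltx : List (Int × Int)) (ad : List (Int × Int × Int))
    (cache : List (Int × List Int)) {n m : Nat}
    (h : ∀ c, fisGN ltx ad cache n c = true → fisGN ltx ad cache m c = true) :
    ∀ k, fisGN ltx ad cache (n+1) k = true → fisGN ltx ad cache (m+1) k = true := by
  intro k hk
  by_cases hb : fisBase ltx cache ad k = true
  · exact fisBase_gn ltx ad cache hb _
  · have hb' : fisBase ltx cache ad k = false := by
      cases hbb : fisBase ltx cache ad k
      · rfl
      · exact absurd hbb hb
    simp only [fisGN, hb', Bool.false_or] at hk ⊢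
    cases ha : (PySem.Dict.mk ad).get? k with
    | none => rfl
    | some p =>
      rw [ha] at hk
      simp only [Bool.and_eq_true] at hk ⊢
      exact ⟨h _ hk.1, h _ hk.2⟩

-- the finite set of AND-gate keys, and the grounded live keys at fuel n
def fisKeysF (ad : List (Int × Int × Int)) : Finset Int := (ad.map (·.1)).toFinset

def fisT (ltx : List (Int × Int)) (ad : List (Int × Int × Int)) (cache : List (Int × List Int))
    (n : Nat) : Finset Int :=
  (fisKeysF ad).filter (fun k => fisGN ltx ad cache n k = true ∧ fisBase ltx cache ad k = false)

theorem fisGN_iff_T (ltx : List (Int × Int)) (ad : List (Int × Int × Int))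
    (cache : List (Int × List Int)) (n : Nat) (k : Int) :
    fisGN ltx ad cache n k = true ↔ fisBase ltx cache ad k = true ∨ k ∈ fisT ltx ad cache n := by
  constructor
  · intro h
    by_cases hb : fisBase ltx cache ad k = true
    · exact Or.inl hb
    · right
      have hb' : fisBase ltx cache ad k = false := by
        cases hbb : fisBase ltx cache ad k
        · rfl
        · exact absurd hbb hb
      have hcont : (PySem.Dict.mk ad).contains k = true := by
        simp only [fisBase] at hb'
        rcases Bool.or_eq_false_iff.mp hb' with ⟨_, h2⟩
        cases hcc : (PySem.Dict.mk ad).contains k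
        · rw [hcc] at h2; simp at h2
        · rfl
      have : ((PySem.Dict.mk ad).get? k).isSome := by
        rw [PySem.Dict.contains_eq_isSome_get?] at hcont; exact hcont
      rcases Option.isSome_iff_exists.1 this with ⟨p, hp⟩
      have hmem : k ∈ fisKeysF ad := by
        have : (k, p) ∈ ad := PySem.Dict.mem_items_of_get?_eq_some _ hp
        exact List.mem_toFinset.2 (List.mem_map.2 ⟨(k, p), this, rfl⟩)
      exact Finset.mem_filter.2 ⟨hmem, h, hb'⟩
  · intro h
    rcases h with h | h
    · exact fisBase_gn ltx ad cache h n
    · exact (Finset.mem_filter.1 h).2.1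

theorem fisT_mono (ltx : List (Int × Int)) (ad : List (Int × Int × Int))
    (cache : List (Int × List Int)) (n : Nat) :
    fisT ltx ad cache n ⊆ fisT ltx ad cache (n+1) := by
  intro k hk
  rcases Finset.mem_filter.1 hk with ⟨h1, h2, h3⟩
  exact Finset.mem_filter.2 ⟨h1, fisGN_mono ltx ad cache n k h2, h3⟩

theorem fisT_eq_succ (ltx : List (Int × Int)) (ad : List (Int × Int × Int))
    (cache : List (Int × List Int)) {n : Nat}
    (h : fisT ltx ad cache (n+1) = fisT ltx ad cache n) :
    fisT ltx ad cache (n+2) = fisT ltx ad cache (n+1) := by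
  apply Finset.Subset.antisymm
  · intro k hk
    rcases Finset.mem_filter.1 hk with ⟨h1, h2, h3⟩
    refine Finset.mem_filter.2 ⟨h1, ?_, h3⟩
    refine fisGN_step_subset ltx ad cache ?_ k h2
    intro c hc
    have := (fisGN_iff_T ltx ad cache (n+1) c).1 hc
    rw [h] at this
    exact (fisGN_iff_T ltx ad cache n c).2 this
  · exact fisT_mono ltx ad cache (n+1)

theorem fisT_aux (ltx : List (Int × Int)) (ad : List (Int × Int × Int))
    (cache : List (Int × List Int)) :
    ∀ n, fisT ltx ad cache (n+1) = fisT ltx ad cache n ∨ n + 1 ≤ (fisT ltx ad cache (n+1)).card := by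
  intro n
  induction n with
  | zero =>
    show fisT ltx ad cache 1 = fisT ltx ad cache 0 ∨ 1 ≤ (fisT ltx ad cache 1).card
    by_cases h : fisT ltx ad cache 1 = fisT ltx ad cache 0
    · exact Or.inl h
    · right
      have hss : fisT ltx ad cache 0 ⊂ fisT ltx ad cache 1 :=
        Finset.ssubset_iff_subset_ne.2 ⟨fisT_mono ltx ad cache 0, fun h' => h h'.symm⟩
      have := Finset.card_lt_card hss
      omega
  | succ n ih =>
    show fisT ltx ad cache (n+2) = fisT ltx ad cache (n+1) ∨ n+2 ≤ (fisT ltx ad cache (n+2)).card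
    by_cases h : fisT ltx ad cache (n+2) = fisT ltx ad cache (n+1)
    · exact Or.inl h
    · right
      rcases ih with heq | hcard
      · exact absurd (fisT_eq_succ ltx ad cache heq) h
      · have hss : fisT ltx ad cache (n+1) ⊂ fisT ltx ad cache (n+2) :=
          Finset.ssubset_iff_subset_ne.2 ⟨fisT_mono ltx ad cache (n+1), fun h' => h h'.symm⟩
        have := Finset.card_lt_card hss
        omega

theorem fisT_card_le (ltx : List (Int × Int)) (ad : List (Int × Int × Int))
    (cache : List (Int × List Int)) (n : Nat) : (fisT ltx ad cache n).card ≤ ad.length := by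
  have h1 : (fisT ltx ad cache n).card ≤ (fisKeysF ad).card := Finset.card_filter_le _ _
  have h2 : (fisKeysF ad).card ≤ (ad.map (·.1)).length := by
    unfold fisKeysF; exact List.toFinset_card_le _
  have h3 : (ad.map (·.1)).length = ad.length := List.length_map ..
  omega

theorem fisT_stab (ltx : List (Int × Int)) (ad : List (Int × Int × Int))
    (cache : List (Int × List Int)) :
    fisT ltx ad cache (ad.length + 1) = fisT ltx ad cache ad.length := by
  rcases fisT_aux ltx ad cache ad.length with h | h
  · exact h
  · have := fisT_card_le ltx ad cache (ad.length + 1)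
    omega

theorem fisT_stable_succ (ltx : List (Int × Int)) (ad : List (Int × Int × Int))
    (cache : List (Int × List Int)) :
    ∀ m, fisT ltx ad cache (ad.length + m + 1) = fisT ltx ad cache (ad.length + m) := by
  intro m
  induction m with
  | zero => exact fisT_stab ltx ad cache
  | succ m ih =>
    have : ad.length + (m+1) + 1 = (ad.length + m) + 2 := by omega
    rw [this]
    have : ad.length + (m+1) = (ad.length + m) + 1 := by omega
    rw [this]
    exact fisT_eq_succ ltx ad cache ih

theorem fisT_stable (ltx : List (Int × Int)) (ad : List (Int × Int × Int))
    (cache : List (Int × List Int)) :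
    ∀ m, fisT ltx ad cache (ad.length + m) = fisT ltx ad cache ad.length := by
  intro m
  induction m with
  | zero => rfl
  | succ m ih =>
    have : ad.length + (m+1) = ad.length + m + 1 := by omega
    rw [this, fisT_stable_succ ltx ad cache m, ih]

-- saturation: grounded at any fuel → grounded at fuel |and_dict|+1
theorem fisGN_sat (ltx : List (Int × Int)) (ad : List (Int × Int × Int))
    (cache : List (Int × List Int)) :
    ∀ n k, fisGN ltx ad cache n k = true → fisGN ltx ad cache (ad.length + 1) k = true := by
  intro n k h
  rcases Nat.lt_or_ge n (ad.length + 1) with hlt | hge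
  · exact fisGN_mono_le ltx ad cache (by omega) h
  · have hn : n = ad.length + (n - ad.length) := by omega
    rw [hn] at h
    have := (fisGN_iff_T ltx ad cache (ad.length + (n - ad.length)) k).1 h
    rw [fisT_stable ltx ad cache (n - ad.length)] at this
    have hL : fisGN ltx ad cache ad.length k = true :=
      (fisGN_iff_T ltx ad cache ad.length k).2 this
    exact fisGN_mono ltx ad cache ad.length k hL

-- ===== the pure (cache-free) value of a literal, at fuel f =====
def fisVal (ltx : PySem.Dict Int Int) (ad : PySem.Dict Int (Int × Int))
    (cache : PySem.Dict Int (List Int)) : Nat → Int → List Int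
  | 0, _ => []
  | n+1, l0 =>
    match cache.get? (fisPn l0) with
    | some s => s
    | none =>
      match ltx.get? (fisPn l0) with
      | some i => [i]
      | none =>
        match ad.get? (fisPn l0) with
        | some p => PySem.Set.union (fisVal ltx ad cache n p.1) (fisVal ltx ad cache n p.2)
        | none => []

theorem fisVal_succ (ltx : PySem.Dict Int Int) (ad : PySem.Dict Int (Int × Int))
    (cache : PySem.Dict Int (List Int)) (n : Nat) (l0 : Int) :
    fisVal ltx ad cache (n+1) l0
      = match cache.get? (fisPn l0) with
        | some s => s
        | none =>
          match ltx.get? (fisPn l0) with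
          | some i => [i]
          | none =>
            match ad.get? (fisPn l0) with
            | some p => PySem.Set.union (fisVal ltx ad cache n p.1) (fisVal ltx ad cache n p.2)
            | none => [] := rfl

theorem fisVal_pn (ltx : PySem.Dict Int Int) (ad : PySem.Dict Int (Int × Int))
    (cache : PySem.Dict Int (List Int)) (f : Nat) (l : Int) :
    fisVal ltx ad cache f (fisPn l) = fisVal ltx ad cache f l := by
  cases f with
  | zero => rfl
  | succ n => simp only [fisVal, fisPn_idem]

-- fuel-irrelevance on grounded literals
theorem fisVal_irrel (ltx : List (Int × Int)) (ad : List (Int × Int × Int))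
    (cache : List (Int × List Int)) :
    ∀ m l f f', fisGN ltx ad cache m (fisPn l) = true → m < f → m < f' →
      fisVal (PySem.Dict.mk ltx) (PySem.Dict.mk ad) (PySem.Dict.mk cache) f l
        = fisVal (PySem.Dict.mk ltx) (PySem.Dict.mk ad) (PySem.Dict.mk cache) f' l := by
  intro m
  induction m with
  | zero =>
    intro l f f' hg hf hf'
    cases f with
    | zero => omega
    | succ a =>
      cases f' with
      | zero => omega
      | succ b =>
        rw [fisVal_succ, fisVal_succ]
        cases hc : (PySem.Dict.mk cache).get? (fisPn l) with
        | some s => rfl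
        | none =>
          cases hx : (PySem.Dict.mk ltx).get? (fisPn l) with
          | some i => rfl
          | none =>
            cases ha : (PySem.Dict.mk ad).get? (fisPn l) with
            | none => rfl
            | some p => exact absurd hg (by
                intro h
                exact fisGN_zero_absurd ltx ad cache hc hx ha h)
  | succ m ih =>
    intro l f f' hg hf hf'
    cases f with
    | zero => omega
    | succ a =>
      cases f' with
      | zero => omega
      | succ b =>
        rw [fisVal_succ, fisVal_succ]
        cases hc : (PySem.Dict.mk cache).get? (fisPn l) with
        | some s => rfl
        | none =>
          cases hx : (PySem.Dict.mk ltx).get? (fisPn l) with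
          | some i => rfl
          | none =>
            cases ha : (PySem.Dict.mk ad).get? (fisPn l) with
            | none => rfl
            | some p =>
              have hch := fisGN_children ltx ad cache hc hx ha hg
              show PySem.Set.union
                  (fisVal (PySem.Dict.mk ltx) (PySem.Dict.mk ad) (PySem.Dict.mk cache) a p.1)
                  (fisVal (PySem.Dict.mk ltx) (PySem.Dict.mk ad) (PySem.Dict.mk cache) a p.2)
                = PySem.Set.union
                  (fisVal (PySem.Dict.mk ltx) (PySem.Dict.mk ad) (PySem.Dict.mk cache) b p.1)
                  (fisVal (PySem.Dict.mk ltx) (PySem.Dict.mk ad) (PySem.Dict.mk cache) b p.2)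
              rw [ih p.1 a b hch.1 (by omega) (by omega),
                  ih p.2 a b hch.2 (by omega) (by omega)]

-- fisVv: the value at the canonical fuel
def fisVv (ltx : List (Int × Int)) (ad : List (Int × Int × Int))
    (cache : List (Int × List Int)) (l : Int) : List Int :=
  fisVal (PySem.Dict.mk ltx) (PySem.Dict.mk ad) (PySem.Dict.mk cache) (2 * ad.length + 2) l

theorem fisVv_pn (ltx : List (Int × Int)) (ad : List (Int × Int × Int))
    (cache : List (Int × List Int)) (l : Int) :
    fisVv ltx ad cache (fisPn l) = fisVv ltx ad cache l := fisVal_pn ..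

theorem fisVv_cache (ltx : List (Int × Int)) (ad : List (Int × Int × Int))
    (cache : List (Int × List Int)) {l : Int} {s : List Int} (hl : PySem.Int.mod l 2 = 0)
    (hc : (PySem.Dict.mk cache).get? l = some s) : fisVv ltx ad cache l = s := by
  show fisVal _ _ _ (2 * ad.length + 1 + 1) l = s
  rw [fisVal_succ, fisPn_of_even l hl, hc]

theorem fisVv_ltx (ltx : List (Int × Int)) (ad : List (Int × Int × Int))
    (cache : List (Int × List Int)) {l : Int} {i : Int} (hl : PySem.Int.mod l 2 = 0)
    (hc : (PySem.Dict.mk cache).get? l = none)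
    (hx : (PySem.Dict.mk ltx).get? l = some i) : fisVv ltx ad cache l = [i] := by
  show fisVal _ _ _ (2 * ad.length + 1 + 1) l = [i]
  rw [fisVal_succ, fisPn_of_even l hl, hc, hx]

theorem fisVv_none (ltx : List (Int × Int)) (ad : List (Int × Int × Int))
    (cache : List (Int × List Int)) {l : Int} (hl : PySem.Int.mod l 2 = 0)
    (hc : (PySem.Dict.mk cache).get? l = none)
    (hx : (PySem.Dict.mk ltx).get? l = none)
    (ha : (PySem.Dict.mk ad).get? l = none) : fisVv ltx ad cache l = [] := by
  show fisVal _ _ _ (2 * ad.length + 1 + 1) l = []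
  rw [fisVal_succ, fisPn_of_even l hl, hc, hx, ha]

theorem fisVv_and (ltx : List (Int × Int)) (ad : List (Int × Int × Int))
    (cache : List (Int × List Int)) {l : Int} {p : Int × Int} {m : Nat}
    (hl : PySem.Int.mod l 2 = 0)
    (hc : (PySem.Dict.mk cache).get? l = none)
    (hx : (PySem.Dict.mk ltx).get? l = none)
    (ha : (PySem.Dict.mk ad).get? l = some p)
    (h1 : fisGN ltx ad cache m (fisPn p.1) = true)
    (h2 : fisGN ltx ad cache m (fisPn p.2) = true)
    (hm : m < 2 * ad.length + 1) :
    fisVv ltx ad cache l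
      = PySem.Set.union (fisVv ltx ad cache p.1) (fisVv ltx ad cache p.2) := by
  have hl' : fisPn l = l := fisPn_of_even l hl
  show fisVal _ _ _ (2 * ad.length + 1 + 1) l = _
  rw [fisVal_succ, hl', hc, hx, ha]
  show PySem.Set.union
      (fisVal (PySem.Dict.mk ltx) (PySem.Dict.mk ad) (PySem.Dict.mk cache) (2*ad.length+1) p.1)
      (fisVal (PySem.Dict.mk ltx) (PySem.Dict.mk ad) (PySem.Dict.mk cache) (2*ad.length+1) p.2)
    = _
  rw [fisVal_irrel ltx ad cache m p.1 (2*ad.length+1) (2*ad.length+2) h1 hm (by omega),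
      fisVal_irrel ltx ad cache m p.2 (2*ad.length+1) (2*ad.length+2) h2 hm (by omega)]
  rfl

theorem fisCore_succ (ltx : PySem.Dict Int Int) (ad : PySem.Dict Int (Int × Int)) (a : Nat)
    (l : Int) (c : PySem.Dict Int (List Int)) :
    fisCore ltx ad (a+1) l c
      = match c.get? (fisPn l) with
        | some v => (v, c)
        | none =>
          match ltx.get? (fisPn l) with
          | some idx => ([idx], c.insert (fisPn l) [idx])
          | none =>
            match ad.get? (fisPn l) with
            | some p =>
              (PySem.Set.union (fisCore ltx ad a p.1 c).1
                  (fisCore ltx ad a p.2 (fisCore ltx ad a p.1 c).2).1,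
               (fisCore ltx ad a p.2 (fisCore ltx ad a p.1 c).2).2.insert (fisPn l)
                 (PySem.Set.union (fisCore ltx ad a p.1 c).1
                    (fisCore ltx ad a p.2 (fisCore ltx ad a p.1 c).2).1))
            | none => ([], c.insert (fisPn l) []) := by
  simp only [fisCore]
  rw [fisNormA]

-- cache invariant: every even entry of the evolving cache holds its fisVv value,
-- and the original cache's entries are still present
def fisInv (ltx : List (Int × Int)) (ad : List (Int × Int × Int)) (cache : List (Int × List Int))
    (c : PySem.Dict Int (List Int)) : Prop :=
  (∀ k s, PySem.Int.mod k 2 = 0 → c.get? k = some s → s = fisVv ltx ad cache k) ∧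
  (∀ k s, (PySem.Dict.mk cache).get? k = some s → c.get? k = some s)

theorem fisInv_init (ltx : List (Int × Int)) (ad : List (Int × Int × Int))
    (cache : List (Int × List Int)) : fisInv ltx ad cache (PySem.Dict.mk cache) :=
  ⟨fun _ s hk hks => (fisVv_cache ltx ad cache hk hks).symm, fun _ _ h => h⟩

theorem fisInv_insert (ltx : List (Int × Int)) (ad : List (Int × Int × Int))
    (cache : List (Int × List Int)) {c : PySem.Dict Int (List Int)}
    (h : fisInv ltx ad cache c) {l : Int} (hl : PySem.Int.mod l 2 = 0)
    {v : List Int} (hv : v = fisVv ltx ad cache l) :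
    fisInv ltx ad cache (c.insert l v) := by
  constructor
  · intro k s hk hks
    rw [PySem.Dict.get?_insert] at hks
    by_cases hkl : k = l
    · rw [if_pos hkl] at hks
      cases hks; rw [hv, hkl]
    · rw [if_neg hkl] at hks; exact h.1 k s hk hks
  · intro k s hks
    have hcs := h.2 k s hks
    rw [PySem.Dict.get?_insert]
    by_cases hkl : k = l
    · subst hkl
      rw [if_pos rfl, hv, (h.1 k s hl hcs)]
    · rw [if_neg hkl]; exact hcs

theorem fisCore_main (ltx : List (Int × Int)) (ad : List (Int × Int × Int))
    (cache : List (Int × List Int)) :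
    ∀ n l f (c : PySem.Dict Int (List Int)),
      fisGN ltx ad cache n (fisPn l) = true → n ≤ ad.length + 1 → n < f →
      fisInv ltx ad cache c →
      (fisCore (PySem.Dict.mk ltx) (PySem.Dict.mk ad) f l c).1 = fisVv ltx ad cache l ∧
      fisInv ltx ad cache (fisCore (PySem.Dict.mk ltx) (PySem.Dict.mk ad) f l c).2 := by
  intro n
  induction n with
  | zero =>
    intro l f c hg hn hf hinv
    cases f with
    | zero => omega
    | succ a =>
      rw [fisCore_succ]
      cases hcc : c.get? (fisPn l) with
      | some v =>
        refine ⟨?_, hinv⟩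
        show v = fisVv ltx ad cache l
        rw [← fisVv_pn ltx ad cache l]
        exact hinv.1 (fisPn l) v (fisPn_even l) hcc
      | none =>
        have hc0 : (PySem.Dict.mk cache).get? (fisPn l) = none := by
          cases h0 : (PySem.Dict.mk cache).get? (fisPn l) with
          | none => rfl
          | some s =>
            have := hinv.2 _ _ h0
            rw [hcc] at this; cases this
        cases hxx : (PySem.Dict.mk ltx).get? (fisPn l) with
        | some idx =>
          have hval : fisVv ltx ad cache (fisPn l) = [idx] :=
            fisVv_ltx ltx ad cache (fisPn_even l) hc0 hxx
          refine ⟨?_, ?_⟩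
          · show [idx] = fisVv ltx ad cache l
            rw [← fisVv_pn ltx ad cache l, hval]
          · show fisInv ltx ad cache (c.insert (fisPn l) [idx])
            exact fisInv_insert ltx ad cache hinv (fisPn_even l) hval.symm
        | none =>
          cases haa : (PySem.Dict.mk ad).get? (fisPn l) with
          | some p => exact absurd hg (by
              intro h
              exact fisGN_zero_absurd ltx ad cache hc0 hxx haa h)
          | none =>
            have hval : fisVv ltx ad cache (fisPn l) = [] :=
              fisVv_none ltx ad cache (fisPn_even l) hc0 hxx haa
            refine ⟨?_, ?_⟩
            · show ([] : List Int) = fisVv ltx ad cache l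
              rw [← fisVv_pn ltx ad cache l, hval]
            · exact fisInv_insert ltx ad cache hinv (fisPn_even l) hval.symm
  | succ m ih =>
    intro l f c hg hn hf hinv
    cases f with
    | zero => omega
    | succ a =>
      rw [fisCore_succ]
      cases hcc : c.get? (fisPn l) with
      | some v =>
        refine ⟨?_, hinv⟩
        show v = fisVv ltx ad cache l
        rw [← fisVv_pn ltx ad cache l]
        exact hinv.1 (fisPn l) v (fisPn_even l) hcc
      | none =>
        have hc0 : (PySem.Dict.mk cache).get? (fisPn l) = none := by
          cases h0 : (PySem.Dict.mk cache).get? (fisPn l) with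
          | none => rfl
          | some s =>
            have := hinv.2 _ _ h0
            rw [hcc] at this; cases this
        cases hxx : (PySem.Dict.mk ltx).get? (fisPn l) with
        | some idx =>
          have hval : fisVv ltx ad cache (fisPn l) = [idx] :=
            fisVv_ltx ltx ad cache (fisPn_even l) hc0 hxx
          refine ⟨?_, ?_⟩
          · show [idx] = fisVv ltx ad cache l
            rw [← fisVv_pn ltx ad cache l, hval]
          · show fisInv ltx ad cache (c.insert (fisPn l) [idx])
            exact fisInv_insert ltx ad cache hinv (fisPn_even l) hval.symm
        | none =>
          cases haa : (PySem.Dict.mk ad).get? (fisPn l) with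
          | some p =>
            have hch := fisGN_children ltx ad cache hc0 hxx haa hg
            have e1 := ih p.1 a c hch.1 (by omega) (by omega) hinv
            have e2 := ih p.2 a (fisCore (PySem.Dict.mk ltx) (PySem.Dict.mk ad) a p.1 c).2
              hch.2 (by omega) (by omega) e1.2
            have hval : PySem.Set.union
                (fisCore (PySem.Dict.mk ltx) (PySem.Dict.mk ad) a p.1 c).1
                (fisCore (PySem.Dict.mk ltx) (PySem.Dict.mk ad) a p.2
                  (fisCore (PySem.Dict.mk ltx) (PySem.Dict.mk ad) a p.1 c).2).1
                = fisVv ltx ad cache (fisPn l) := by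
              rw [e1.1, e2.1,
                fisVv_and ltx ad cache (fisPn_even l) hc0 hxx haa hch.1 hch.2 (by omega)]
            refine ⟨?_, ?_⟩
            · show PySem.Set.union
                  (fisCore (PySem.Dict.mk ltx) (PySem.Dict.mk ad) a p.1 c).1
                  (fisCore (PySem.Dict.mk ltx) (PySem.Dict.mk ad) a p.2
                    (fisCore (PySem.Dict.mk ltx) (PySem.Dict.mk ad) a p.1 c).2).1
                = fisVv ltx ad cache l
              rw [hval, fisVv_pn]
            · exact fisInv_insert ltx ad cache e2.2 (fisPn_even l) hval
          | none =>
            have hval : fisVv ltx ad cache (fisPn l) = [] :=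
              fisVv_none ltx ad cache (fisPn_even l) hc0 hxx haa
            refine ⟨?_, ?_⟩
            · show ([] : List Int) = fisVv ltx ad cache l
              rw [← fisVv_pn ltx ad cache l, hval]
            · exact fisInv_insert ltx ad cache hinv (fisPn_even l) hval.symm

-- ===== B side =====
-- invariant on the worklist table: entries are even grounded literals holding their fisVv value
def fisVInv (ltx : List (Int × Int)) (ad : List (Int × Int × Int)) (cache : List (Int × List Int))
    (val : PySem.Dict Int (List Int)) : Prop :=
  ∀ k s, val.get? k = some s →
    PySem.Int.mod k 2 = 0 ∧ s = fisVv ltx ad cache k ∧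
    fisGN ltx ad cache (ad.length + 1) k = true

theorem fisKnown_some (ltx : List (Int × Int)) (ad : List (Int × Int × Int))
    (cache : List (Int × List Int)) {val : PySem.Dict Int (List Int)} {l : Int} {s : List Int}
    (hl : PySem.Int.mod l 2 = 0) (hinv : fisVInv ltx ad cache val)
    (h : fisKnown (PySem.Dict.mk ltx) (PySem.Dict.mk ad) (PySem.Dict.mk cache) val l = some s) :
    s = fisVv ltx ad cache l ∧ fisGN ltx ad cache (ad.length + 1) l = true := by
  unfold fisKnown at h
  cases hc : (PySem.Dict.mk cache).get? l with
  | some t =>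
    rw [hc] at h; cases h
    refine ⟨(fisVv_cache ltx ad cache hl hc).symm, ?_⟩
    refine fisBase_gn ltx ad cache ?_ _
    simp [fisBase, PySem.Dict.contains_eq_isSome_get?, hc]
  | none =>
    rw [hc] at h
    cases hx : (PySem.Dict.mk ltx).get? l with
    | some i =>
      rw [hx] at h; cases h
      refine ⟨(fisVv_ltx ltx ad cache hl hc hx).symm, ?_⟩
      refine fisBase_gn ltx ad cache ?_ _
      simp [fisBase, PySem.Dict.contains_eq_isSome_get?, hx]
    | none =>
      rw [hx] at h
      cases hct : (PySem.Dict.mk ad).contains l with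
      | true =>
        rw [hct] at h
        simp only [if_true] at h
        have h' := hinv l s h
        exact ⟨h'.2.1, h'.2.2⟩
      | false =>
        rw [hct] at h
        simp only [Bool.false_eq_true, if_false] at h
        cases h
        have ha : (PySem.Dict.mk ad).get? l = none :=
          (PySem.Dict.get?_eq_none_iff_contains _ _).2 hct
        refine ⟨(fisVv_none ltx ad cache hl hc hx ha).symm, ?_⟩
        refine fisBase_gn ltx ad cache ?_ _
        simp [fisBase, hct]

theorem fisKnown_none (ltx : List (Int × Int)) (ad : List (Int × Int × Int))
    (cache : List (Int × List Int)) {val : PySem.Dict Int (List Int)} {l : Int}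
    (h : fisKnown (PySem.Dict.mk ltx) (PySem.Dict.mk ad) (PySem.Dict.mk cache) val l = none) :
    (PySem.Dict.mk cache).get? l = none ∧ (PySem.Dict.mk ltx).get? l = none ∧
    (∃ p, (PySem.Dict.mk ad).get? l = some p) ∧ val.get? l = none := by
  unfold fisKnown at h
  cases hc : (PySem.Dict.mk cache).get? l with
  | some t => rw [hc] at h; cases h
  | none =>
    rw [hc] at h
    cases hx : (PySem.Dict.mk ltx).get? l with
    | some i => rw [hx] at h; cases h
    | none =>
      rw [hx] at h
      cases hct : (PySem.Dict.mk ad).contains l with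
      | false => rw [hct] at h; simp only [Bool.false_eq_true, if_false] at h; cases h
      | true =>
        rw [hct] at h
        simp only [if_true] at h
        have : ((PySem.Dict.mk ad).get? l).isSome := by
          rw [PySem.Dict.contains_eq_isSome_get?] at hct; exact hct
        rcases Option.isSome_iff_exists.1 this with ⟨p, hp⟩
        exact ⟨rfl, rfl, ⟨p, hp⟩, h⟩

-- step either leaves acc unchanged or inserts a fresh AND key and sets the flag
theorem fisStep_cases (ltx : PySem.Dict Int Int) (ad : PySem.Dict Int (Int × Int))
    (cache : PySem.Dict Int (List Int)) (acc : PySem.Dict Int (List Int) × Bool)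
    (e : Int × Int × Int) :
    fisStep ltx ad cache acc e = acc ∨
    (∃ (p : Int × Int) (w : List Int × List Int), PySem.Int.mod e.1 2 = 0 ∧ acc.1.get? e.1 = none ∧ cache.get? e.1 = none ∧
      ltx.get? e.1 = none ∧ ad.get? e.1 = some p ∧
      fisKnown ltx ad cache acc.1 (p.1 - PySem.Int.mod p.1 2) = some w.1 ∧
      fisKnown ltx ad cache acc.1 (p.2 - PySem.Int.mod p.2 2) = some w.2 ∧
      fisStep ltx ad cache acc e = (acc.1.insert e.1 (PySem.Set.union w.1 w.2), true)) := by
  by_cases hcond : PySem.Int.mod e.1 2 ≠ 0 ∨ acc.1.contains e.1 ∨ cache.contains e.1 ∨ ltx.contains e.1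
  · left; unfold fisStep; rw [if_pos hcond]
  · have hcond' := hcond
    push_neg at hcond'
    obtain ⟨h1, h2, h3, h4⟩ := hcond'
    have h1' : PySem.Int.mod e.1 2 = 0 := by omega
    have h2' : acc.1.get? e.1 = none :=
      (PySem.Dict.get?_eq_none_iff_contains _ _).2 (by simpa using h2)
    have h3' : cache.get? e.1 = none :=
      (PySem.Dict.get?_eq_none_iff_contains _ _).2 (by simpa using h3)
    have h4' : ltx.get? e.1 = none :=
      (PySem.Dict.get?_eq_none_iff_contains _ _).2 (by simpa using h4)
    cases ha : ad.get? e.1 with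
    | none => left; simp only [fisStep, if_neg hcond, ha]
    | some p =>
      cases hka : fisKnown ltx ad cache acc.1 (p.1 - PySem.Int.mod p.1 2) with
      | none => left; simp only [fisStep, if_neg hcond, ha, hka]
      | some sa =>
        cases hkb : fisKnown ltx ad cache acc.1 (p.2 - PySem.Int.mod p.2 2) with
        | none => left; simp only [fisStep, if_neg hcond, ha, hka, hkb]
        | some sb =>
          right
          refine ⟨p, (sa, sb), h1', h2', h3', h4', rfl, hka, hkb, ?_⟩
          simp only [fisStep, if_neg hcond, ha, hka, hkb]

theorem fisStep_sets_true (ltx : PySem.Dict Int Int) (ad : PySem.Dict Int (Int × Int))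
    (cache : PySem.Dict Int (List Int)) (acc : PySem.Dict Int (List Int) × Bool)
    (e : Int × Int × Int) (h : acc.2 = true) : (fisStep ltx ad cache acc e).2 = true := by
  rcases fisStep_cases ltx ad cache acc e with heq | ⟨_, _, _, _, _, _, _, _, _, heq⟩ <;>
    rw [heq] <;> simp [h]

theorem fisFold_true (ltx : PySem.Dict Int Int) (ad : PySem.Dict Int (Int × Int))
    (cache : PySem.Dict Int (List Int)) :
    ∀ (L : List (Int × Int × Int)) (acc), acc.2 = true →
      (L.foldl (fisStep ltx ad cache) acc).2 = true := by
  intro L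
  induction L with
  | nil => intro acc h; exact h
  | cons e t ihl =>
    intro acc h
    rw [List.foldl_cons]
    exact ihl _ (fisStep_sets_true ltx ad cache acc e h)

theorem fisStep_of_false (ltx : PySem.Dict Int Int) (ad : PySem.Dict Int (Int × Int))
    (cache : PySem.Dict Int (List Int)) {acc : PySem.Dict Int (List Int) × Bool}
    {e : Int × Int × Int} (h : (fisStep ltx ad cache acc e).2 = false) :
    fisStep ltx ad cache acc e = acc := by
  rcases fisStep_cases ltx ad cache acc e with heq | ⟨_, _, _, _, _, _, _, _, _, heq⟩
  · exact heq
  · rw [heq] at h; cases h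

theorem fisFold_false (ltx : PySem.Dict Int Int) (ad : PySem.Dict Int (Int × Int))
    (cache : PySem.Dict Int (List Int)) :
    ∀ (L : List (Int × Int × Int)) (acc), (L.foldl (fisStep ltx ad cache) acc).2 = false →
      L.foldl (fisStep ltx ad cache) acc = acc ∧
      ∀ e ∈ L, fisStep ltx ad cache acc e = acc := by
  intro L
  induction L with
  | nil => intro acc h; exact ⟨rfl, by simp⟩
  | cons e t ihl =>
    intro acc hf
    rw [List.foldl_cons] at hf
    have hse : (fisStep ltx ad cache acc e).2 = false := by
      cases hb : (fisStep ltx ad cache acc e).2 with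
      | false => rfl
      | true => rw [fisFold_true ltx ad cache t _ hb] at hf; cases hf
    have heq := fisStep_of_false ltx ad cache hse
    rw [List.foldl_cons, heq]
    rw [heq] at hf
    have h1 := ihl acc hf
    refine ⟨h1.1, ?_⟩
    intro e' he'
    rcases List.mem_cons.1 he' with he' | he'
    · subst he'; exact heq
    · exact h1.2 e' he'

theorem fisStep_inv (ltx : List (Int × Int)) (ad : List (Int × Int × Int))
    (cache : List (Int × List Int))
    (acc : PySem.Dict Int (List Int) × Bool) (e : Int × Int × Int)
    (hinv : fisVInv ltx ad cache acc.1) :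
    fisVInv ltx ad cache (fisStep (PySem.Dict.mk ltx) (PySem.Dict.mk ad) (PySem.Dict.mk cache) acc e).1 := by
  rcases fisStep_cases (PySem.Dict.mk ltx) (PySem.Dict.mk ad) (PySem.Dict.mk cache) acc e with
    heq | ⟨p, w, h1, h2, h3, h4, ha, hka, hkb, heq⟩
  · rw [heq]; exact hinv
  · rw [heq]
    intro k s hks
    rw [PySem.Dict.get?_insert] at hks
    by_cases hke : k = e.1
    · rw [if_pos hke] at hks
      cases hks
      subst hke
      have hLpos : 1 ≤ ad.length := by
        have : (e.1, p) ∈ ad := PySem.Dict.mem_items_of_get?_eq_some _ ha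
        have := List.length_pos_of_mem this
        omega
      have hsa := fisKnown_some ltx ad cache (fisPn_even p.1) hinv hka
      have hsb := fisKnown_some ltx ad cache (fisPn_even p.2) hinv hkb
      refine ⟨h1, ?_, ?_⟩
      · rw [hsa.1, hsb.1]
        show PySem.Set.union (fisVv ltx ad cache (fisPn p.1)) (fisVv ltx ad cache (fisPn p.2)) = _
        rw [fisVv_pn, fisVv_pn]
        exact (fisVv_and ltx ad cache h1 h3 h4 ha hsa.2 hsb.2 (by omega)).symm
      · -- the new gate is grounded one level higher; saturate back down
        refine fisGN_sat ltx ad cache (ad.length + 2) e.1 ?_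
        show fisGN ltx ad cache (ad.length + 1 + 1) e.1 = true
        have hb := fisBase_false ltx ad cache h3 h4 ha
        simp only [fisGN, hb, Bool.false_or, ha, Bool.and_eq_true]
        exact ⟨hsa.2, hsb.2⟩
    · rw [if_neg hke] at hks; exact hinv k s hks

theorem fisFold_inv (ltx : List (Int × Int)) (ad : List (Int × Int × Int))
    (cache : List (Int × List Int)) :
    ∀ (L : List (Int × Int × Int)) (acc : PySem.Dict Int (List Int) × Bool),
      fisVInv ltx ad cache acc.1 →
      fisVInv ltx ad cache
        ((L.foldl (fisStep (PySem.Dict.mk ltx) (PySem.Dict.mk ad) (PySem.Dict.mk cache)) acc)).1 := by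
  intro L
  induction L with
  | nil => intro acc h; exact h
  | cons e t ihl =>
    intro acc h
    rw [List.foldl_cons]
    exact ihl _ (fisStep_inv ltx ad cache acc e h)

theorem fisStep_get_mono (ltx : PySem.Dict Int Int) (ad : PySem.Dict Int (Int × Int))
    (cache : PySem.Dict Int (List Int)) {acc : PySem.Dict Int (List Int) × Bool}
    {e : Int × Int × Int} {k : Int} {s : List Int} (h : acc.1.get? k = some s) :
    (fisStep ltx ad cache acc e).1.get? k = some s := by
  rcases fisStep_cases ltx ad cache acc e with heq | ⟨p, w, _, h2, _, _, _, _, _, heq⟩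
  · rw [heq]; exact h
  · rw [heq]
    have hke : k ≠ e.1 := by
      intro hk; rw [hk, h2] at h; cases h
    rw [PySem.Dict.get?_insert_of_ne _ _ hke]
    exact h

theorem fisFold_get_mono (ltx : PySem.Dict Int Int) (ad : PySem.Dict Int (Int × Int))
    (cache : PySem.Dict Int (List Int)) :
    ∀ (L : List (Int × Int × Int)) (acc : PySem.Dict Int (List Int) × Bool) (k : Int) (s : List Int),
      acc.1.get? k = some s → (L.foldl (fisStep ltx ad cache) acc).1.get? k = some s := by
  intro L
  induction L with
  | nil => intro acc k s h; exact h
  | cons e t ihl =>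
    intro acc k s h
    rw [List.foldl_cons]
    exact ihl _ k s (fisStep_get_mono ltx ad cache h)

theorem fisFold_new_key (ltx : PySem.Dict Int Int) (adD : PySem.Dict Int (Int × Int))
    (cache : PySem.Dict Int (List Int)) :
    ∀ (L : List (Int × Int × Int)) (acc : PySem.Dict Int (List Int) × Bool),
      acc.2 = false → (L.foldl (fisStep ltx adD cache) acc).2 = true →
      ∃ k, (adD.get? k).isSome ∧ acc.1.get? k = none ∧
        (((L.foldl (fisStep ltx adD cache) acc)).1.get? k).isSome := by
  intro L
  induction L with
  | nil => intro acc h ht; rw [List.foldl_nil] at ht; rw [h] at ht; cases ht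
  | cons e t ihl =>
    intro acc h ht
    rw [List.foldl_cons] at ht ⊢
    rcases fisStep_cases ltx adD cache acc e with heq | ⟨p, w, _, h2, _, _, ha, _, _, heq⟩
    · rw [heq] at ht ⊢
      exact ihl acc h ht
    · refine ⟨e.1, by rw [ha]; rfl, h2, ?_⟩
      rw [heq]
      exact Option.isSome_iff_exists.2 ⟨_,
        fisFold_get_mono ltx adD cache t _ e.1 _ (PySem.Dict.get?_insert_self _ _ _)⟩

def fisMiss (ad : List (Int × Int × Int)) (val : PySem.Dict Int (List Int)) : Finset Int :=
  (ad.map (·.1)).toFinset.filter (fun k => val.get? k = none)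

theorem fisFold_miss_lt (ltx : List (Int × Int)) (ad : List (Int × Int × Int))
    (cache : List (Int × List Int)) (val : PySem.Dict Int (List Int))
    (htrue : (ad.foldl (fisStep (PySem.Dict.mk ltx) (PySem.Dict.mk ad) (PySem.Dict.mk cache)) (val, false)).2 = true) :
    (fisMiss ad (ad.foldl (fisStep (PySem.Dict.mk ltx) (PySem.Dict.mk ad) (PySem.Dict.mk cache)) (val, false)).1).card
      < (fisMiss ad val).card := by
  obtain ⟨k0, hk0ad, hk0none, hk0some⟩ :=
    fisFold_new_key (PySem.Dict.mk ltx) (PySem.Dict.mk ad) (PySem.Dict.mk cache) ad (val, false) rfl htrue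
  have hsub : fisMiss ad (ad.foldl (fisStep (PySem.Dict.mk ltx) (PySem.Dict.mk ad) (PySem.Dict.mk cache)) (val, false)).1
      ⊆ fisMiss ad val := by
    intro k hk
    rw [fisMiss, Finset.mem_filter] at hk ⊢
    refine ⟨hk.1, ?_⟩
    cases hv : val.get? k with
    | none => rfl
    | some s =>
      have := fisFold_get_mono (PySem.Dict.mk ltx) (PySem.Dict.mk ad) (PySem.Dict.mk cache) ad (val, false) k s hv
      rw [this] at hk
      cases hk.2
  have hk0mem : k0 ∈ fisMiss ad val := by
    rw [fisMiss, Finset.mem_filter]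
    refine ⟨?_, hk0none⟩
    rcases Option.isSome_iff_exists.1 hk0ad with ⟨p, hp⟩
    exact List.mem_toFinset.2 (List.mem_map.2 ⟨(k0, p), PySem.Dict.mem_items_of_get?_eq_some _ hp, rfl⟩)
  have hk0nmem : k0 ∉ fisMiss ad (ad.foldl (fisStep (PySem.Dict.mk ltx) (PySem.Dict.mk ad) (PySem.Dict.mk cache)) (val, false)).1 := by
    rw [fisMiss, Finset.mem_filter]
    intro hmem
    rw [hmem.2] at hk0some
    cases hk0some
  exact Finset.card_lt_card ((Finset.ssubset_iff_of_subset hsub).2 ⟨k0, hk0mem, hk0nmem⟩)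

-- at a fixpoint, every grounded live AND key is present (by induction on the grounding fuel)
theorem fisFix_complete (ltx : List (Int × Int)) (ad : List (Int × Int × Int))
    (cache : List (Int × List Int)) {val : PySem.Dict Int (List Int)}
    (hfix : ∀ e ∈ ad, fisStep (PySem.Dict.mk ltx) (PySem.Dict.mk ad) (PySem.Dict.mk cache) (val, false) e = (val, false)) :
    ∀ n k, fisGN ltx ad cache n k = true → PySem.Int.mod k 2 = 0 →
      ∀ p, (PySem.Dict.mk ad).get? k = some p →
      (PySem.Dict.mk cache).get? k = none → (PySem.Dict.mk ltx).get? k = none →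
      (val.get? k).isSome := by
  intro n
  induction n with
  | zero =>
    intro k hg hk p hp hc hx
    exact absurd hg (by intro h; exact fisGN_zero_absurd ltx ad cache hc hx hp h)
  | succ m ih =>
    intro k hg hk p hp hc hx
    cases hv : val.get? k with
    | some s => rfl
    | none =>
      exfalso
      have hch := fisGN_children ltx ad cache hc hx hp hg
      have he : (k, p) ∈ ad := PySem.Dict.mem_items_of_get?_eq_some _ hp
      have hstep := hfix (k, p) he
      by_cases hcd : PySem.Int.mod k 2 ≠ 0 ∨ val.contains k
          ∨ (PySem.Dict.mk cache).contains k ∨ (PySem.Dict.mk ltx).contains k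
      · rcases hcd with h | h | h | h
        · exact h hk
        · rw [PySem.Dict.contains_eq_isSome_get?, hv] at h; cases h
        · rw [PySem.Dict.contains_eq_isSome_get?, hc] at h; cases h
        · rw [PySem.Dict.contains_eq_isSome_get?, hx] at h; cases h
      · have hstep2 : fisStep (PySem.Dict.mk ltx) (PySem.Dict.mk ad) (PySem.Dict.mk cache) (val, false) (k, p)
            = match fisKnown (PySem.Dict.mk ltx) (PySem.Dict.mk ad) (PySem.Dict.mk cache) val (p.1 - PySem.Int.mod p.1 2),
                    fisKnown (PySem.Dict.mk ltx) (PySem.Dict.mk ad) (PySem.Dict.mk cache) val (p.2 - PySem.Int.mod p.2 2) with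
              | some sa, some sb => (val.insert k (PySem.Set.union sa sb), true)
              | _, _ => (val, false) := by
          simp only [fisStep, if_neg hcd, hp]
        cases hka : fisKnown (PySem.Dict.mk ltx) (PySem.Dict.mk ad) (PySem.Dict.mk cache) val (p.1 - PySem.Int.mod p.1 2) with
        | none =>
          obtain ⟨hc1, hx1, ⟨p1, hp1⟩, hv1⟩ := fisKnown_none ltx ad cache hka
          have hv1' : val.get? (fisPn p.1) = none := hv1
          have := ih (fisPn p.1) hch.1 (fisPn_even p.1) p1 hp1 hc1 hx1
          rw [hv1'] at this; cases this
        | some sa =>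
          cases hkb : fisKnown (PySem.Dict.mk ltx) (PySem.Dict.mk ad) (PySem.Dict.mk cache) val (p.2 - PySem.Int.mod p.2 2) with
          | none =>
            obtain ⟨hc2, hx2, ⟨p2, hp2⟩, hv2⟩ := fisKnown_none ltx ad cache hkb
            have hv2' : val.get? (fisPn p.2) = none := hv2
            have := ih (fisPn p.2) hch.2 (fisPn_even p.2) p2 hp2 hc2 hx2
            rw [hv2'] at this; cases this
          | some sb =>
            rw [hstep2, hka, hkb] at hstep
            have := congrArg Prod.snd hstep
            simp at this

theorem fisRounds_main (ltx : List (Int × Int)) (ad : List (Int × Int × Int))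
    (cache : List (Int × List Int)) :
    ∀ (n : Nat) (val : PySem.Dict Int (List Int)), fisVInv ltx ad cache val →
      (fisMiss ad val).card < n →
      fisVInv ltx ad cache (fisRounds (PySem.Dict.mk ltx) (PySem.Dict.mk ad) (PySem.Dict.mk cache) ad n val) ∧
      (∀ n' k p, fisGN ltx ad cache n' k = true → PySem.Int.mod k 2 = 0 →
        (PySem.Dict.mk ad).get? k = some p →
        (PySem.Dict.mk cache).get? k = none → (PySem.Dict.mk ltx).get? k = none →
        ((fisRounds (PySem.Dict.mk ltx) (PySem.Dict.mk ad) (PySem.Dict.mk cache) ad n val).get? k).isSome) := by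
  intro n
  induction n with
  | zero => intro val _ hcard; omega
  | succ n ih =>
    intro val hinv hcard
    cases hp2 : (ad.foldl (fisStep (PySem.Dict.mk ltx) (PySem.Dict.mk ad) (PySem.Dict.mk cache)) (val, false)).2 with
    | true =>
      have hval : fisRounds (PySem.Dict.mk ltx) (PySem.Dict.mk ad) (PySem.Dict.mk cache) ad (n+1) val
          = fisRounds (PySem.Dict.mk ltx) (PySem.Dict.mk ad) (PySem.Dict.mk cache) ad n
              (ad.foldl (fisStep (PySem.Dict.mk ltx) (PySem.Dict.mk ad) (PySem.Dict.mk cache)) (val, false)).1 := by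
        simp only [fisRounds, hp2, if_true]
      rw [hval]
      have hinv' := fisFold_inv ltx ad cache ad (val, false) hinv
      have hlt := fisFold_miss_lt ltx ad cache val hp2
      exact ih _ hinv' (by omega)
    | false =>
      have hval : fisRounds (PySem.Dict.mk ltx) (PySem.Dict.mk ad) (PySem.Dict.mk cache) ad (n+1) val = val := by
        simp only [fisRounds, hp2, Bool.false_eq_true, if_false]
      rw [hval]
      have hfix := fisFold_false (PySem.Dict.mk ltx) (PySem.Dict.mk ad) (PySem.Dict.mk cache) ad (val, false) hp2
      refine ⟨hinv, ?_⟩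
      intro n' k p hg hk hp hc hx
      exact fisFix_complete ltx ad cache hfix.2 n' k hg hk p hp hc hx

theorem fisAlt_eq (lit : Int) (ltx : List (Int × Int)) (ad : List (Int × Int × Int))
    (cache : List (Int × List Int))
    (hpre : fisGN ltx ad cache (ad.length + 1) (fisPn lit) = true) :
    find_input_sources_alt lit ltx ad cache = fisVv ltx ad cache lit := by
  have hempty : fisVInv ltx ad cache PySem.Dict.empty := by
    intro k s h
    rw [PySem.Dict.get?_empty] at h
    cases h
  have hmiss : (fisMiss ad PySem.Dict.empty).card < ad.length + 1 := by
    have h1 : (fisMiss ad PySem.Dict.empty).card ≤ (ad.map (·.1)).toFinset.card :=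
      Finset.card_filter_le _ _
    have h2 : (ad.map (·.1)).toFinset.card ≤ (ad.map (·.1)).length := (ad.map (·.1)).toFinset_card_le
    have h3 : (ad.map (·.1)).length = ad.length := List.length_map ..
    omega
  have h := fisRounds_main ltx ad cache (ad.length + 1) PySem.Dict.empty hempty hmiss
  unfold find_input_sources_alt
  show (match fisKnown (PySem.Dict.mk ltx) (PySem.Dict.mk ad) (PySem.Dict.mk cache)
      (fisRounds (PySem.Dict.mk ltx) (PySem.Dict.mk ad) (PySem.Dict.mk cache) ad (ad.length + 1) PySem.Dict.empty)
      (lit - PySem.Int.mod lit 2) with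
    | some r => r
    | none => ([] : List Int)) = fisVv ltx ad cache lit
  cases hk : fisKnown (PySem.Dict.mk ltx) (PySem.Dict.mk ad) (PySem.Dict.mk cache)
      (fisRounds (PySem.Dict.mk ltx) (PySem.Dict.mk ad) (PySem.Dict.mk cache) ad (ad.length + 1) PySem.Dict.empty)
      (lit - PySem.Int.mod lit 2) with
  | some r =>
    show r = fisVv ltx ad cache lit
    have : r = fisVv ltx ad cache (lit - PySem.Int.mod lit 2) :=
      (fisKnown_some ltx ad cache (fisPn_even lit) h.1 hk).1
    rw [this]
    exact fisVv_pn ltx ad cache lit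
  | none =>
    exfalso
    obtain ⟨hc, hx, ⟨p, hp⟩, hv⟩ := fisKnown_none ltx ad cache hk
    have := h.2 (ad.length + 1) (lit - PySem.Int.mod lit 2) p hpre (fisPn_even lit) hp hc hx
    rw [hv] at this
    cases this

-- ===== VERDICT (by name: the statement is the Claim_ definition above) =====
theorem find_input_sources_spec : Claim_equal_find_input_sources := by
  unfold Claim_equal_find_input_sources
  intro lit ltx ad cache _ hpre
  unfold Spec_find_input_sources
  have hpre' : fisGN ltx ad cache (ad.length + 1) (fisPn lit) = true := hpre
  have hA := fisCore_main ltx ad cache (ad.length + 1) lit (2 * ad.length + 2)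
    (PySem.Dict.mk cache) hpre' le_rfl (by omega) (fisInv_init ltx ad cache)
  unfold find_input_sources
  rw [hA.1, fisAlt_eq lit ltx ad cache hpre']
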